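-- pv_equiv track=rewrite | github.com/Nauss/AdventOfCode | 2024/Day 10/main.py | part1
-- ===== SOURCE A (Python) =====
-- def getNextStep(map, x, y):
--     sizeX = len(map[0])
--     sizeY = len(map)
--
--     value = map[y][x] - 1
--     positions = []
--     if y > 0 and map[y - 1][x] == value:
--         positions.append((x, y - 1))
--     if y < sizeY - 1 and map[y + 1][x] == value:
--         positions.append((x, y + 1))
--     if x > 0 and map[y][x - 1] == value:
--         positions.append((x - 1, y))
--     if x < sizeX - 1 and map[y][x + 1] == value:
--         positions.append((x + 1, y))
--
--     return positions
--
-- def findTrails(result, visited, map, x, y):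
--     positions = getNextStep(map, x, y)
--     while len(positions):
--         pos = positions.pop()
--         if pos in visited:
--             continue
--         visited[pos] = True
--         if map[pos[1]][pos[0]] == 0:
--             if pos not in result:
--                 result[pos] = 0
--             result[pos] += 1
--         else:
--             findTrails(result, visited, map, pos[0], pos[1])
--
-- def part1(map):
--     result = {}
--     for y in range(len(map)):
--         for x in range(len(map[y])):
--             if map[y][x] == 9:
--                 visited = {}
--                 findTrails(result, visited, map, x, y)
--     return sum(result.values())
-- ===== SOURCE B (Python) =====
-- def part1(map):
--     total = 0
--     for y, row in enumerate(map):
--         for x, v in enumerate(row):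
--             if v == 9:
--                 # level-synchronous frontier walk: after the round for height h,
--                 # frontier holds the cells of height h reachable downhill from (x, y)
--                 frontier = {(x, y)}
--                 for h in range(8, -1, -1):
--                     nf = set()
--                     for (cx, cy) in frontier:
--                         for (nx, ny) in ((cx, cy - 1), (cx, cy + 1), (cx - 1, cy), (cx + 1, cy)):
--                             if 0 <= ny < len(map) and 0 <= nx < len(map[ny]) and map[ny][nx] == h:
--                                 nf.add((nx, ny))
--                     frontier = nf
--                 total += len(frontier)
--     return total
-- ===== Notes on version B (the rewrite author's own statement) =====
-- stated objective: alternative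
-- what changed: Replaces the per-summit recursive DFS (shared result dict, per-summit visited dict, back-popped position stacks) by a per-summit level-synchronous frontier walk: nine rounds mapping a set of cells at height h+1 to the set of their orthogonal neighbours at height h, the score being the size of the final height-0 frontier; no recursion, no visited bookkeeping, no result dict.
-- outside the precondition, e.g. on part1([[9], [8], [7], [6], [5], [4], [3], [2], [1, 0]]): A returns 0, B returns 1
import Mathlib
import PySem

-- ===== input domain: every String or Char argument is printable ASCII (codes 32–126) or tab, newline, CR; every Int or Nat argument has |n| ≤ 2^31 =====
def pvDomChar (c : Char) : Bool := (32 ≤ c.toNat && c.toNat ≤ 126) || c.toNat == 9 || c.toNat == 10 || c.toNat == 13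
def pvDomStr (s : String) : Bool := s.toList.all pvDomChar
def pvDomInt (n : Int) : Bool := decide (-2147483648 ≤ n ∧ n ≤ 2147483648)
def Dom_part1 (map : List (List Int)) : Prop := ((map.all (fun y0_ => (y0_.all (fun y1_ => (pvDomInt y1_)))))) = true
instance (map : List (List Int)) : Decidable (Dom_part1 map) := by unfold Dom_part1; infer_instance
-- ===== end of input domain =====

-- B replaces A's per-summit recursive DFS (visited/result dicts) by a per-summit
-- level-synchronous frontier walk (nine rounds of neighbour set-maps); alternative
-- decomposition, equal on rectangular grids (and on grids without a 9), see Pre_part1.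

-- shared one-line cell accessor: map[y][x]; the defaults are never reached on the
-- in-bounds accesses both programs make under Pre_part1 (Python raises out of range)
def pvCell (map : List (List Int)) (x y : Int) : Int :=
  PySem.List.pyGetD (PySem.List.pyGetD map y []) x 0

-- ===== PORT A =====
def getNextStep (map : List (List Int)) (x y : Int) : List (Int × Int) :=
  let sizeX : Int := (PySem.List.pyGetD map 0 []).length   -- len(map[0]); map ≠ [] whenever called under Pre_
  let sizeY : Int := map.length
  let value := pvCell map x y - 1
  let positions : List (Int × Int) := []
  let positions := if y > 0 ∧ pvCell map x (y-1) = value then positions ++ [(x, y-1)] else positions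
  let positions := if y < sizeY - 1 ∧ pvCell map x (y+1) = value then positions ++ [(x, y+1)] else positions
  let positions := if x > 0 ∧ pvCell map (x-1) y = value then positions ++ [(x-1, y)] else positions
  let positions := if x < sizeX - 1 ∧ pvCell map (x+1) y = value then positions ++ [(x+1, y)] else positions
  positions

-- findTrails' while-loop pops positions from the BACK and never pushes, i.e. it consumes
-- the reversed neighbour list; the recursive call is inlined as the nested ftLoop call.
-- `fuel` bounds the recursion depth: every recursive call is on a cell one height lower,
-- so from a height-9 start the depth is ≤ 9 and fuel 10 is never exhausted (the proofs
-- below never enter the fuel-0 branch under Pre_); Python's recursion needs no fuel.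
def ftLoop (map : List (List Int)) :
    Nat → List (Int × Int) → PySem.Dict (Int × Int) Int → PySem.Dict (Int × Int) Bool →
    PySem.Dict (Int × Int) Int × PySem.Dict (Int × Int) Bool
  | _, [], res, vis => (res, vis)
  | fuel, pos :: rest, res, vis =>
    if vis.contains pos then ftLoop map fuel rest res vis
    else
      let vis' := vis.insert pos true
      if pvCell map pos.1 pos.2 = 0 then
        let res1 := if res.contains pos then res else res.insert pos 0   -- if pos not in result: result[pos] = 0
        let res2 := res1.insert pos (res1.getD pos 0 + 1)                -- result[pos] += 1
        ftLoop map fuel rest res2 vis'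
      else
        match fuel with
        | 0 => (res, vis')   -- unreachable from a height-9 start (see above)
        | fuel' + 1 =>
          let rv := ftLoop map fuel' ((getNextStep map pos.1 pos.2).reverse) res vis'
          ftLoop map (fuel' + 1) rest rv.1 rv.2
  termination_by fuel l => (fuel, l.length)

def findTrails (fuel : Nat) (map : List (List Int)) (x y : Int)
    (res : PySem.Dict (Int × Int) Int) (vis : PySem.Dict (Int × Int) Bool) :
    PySem.Dict (Int × Int) Int × PySem.Dict (Int × Int) Bool :=
  ftLoop map fuel ((getNextStep map x y).reverse) res vis

def part1 (map : List (List Int)) : Int :=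
  let res :=
    (PySem.List.pyRange 0 map.length 1).foldl (fun res y =>
      (PySem.List.pyRange 0 (PySem.List.pyGetD map y []).length 1).foldl (fun res x =>
        if pvCell map x y = 9 then (findTrails 10 map x y res PySem.Dict.empty).1 else res)
        res)
      PySem.Dict.empty
  res.values.sum

-- ===== PORT B =====
-- one frontier round of Source B: from the set of cells of height h+1, the set of their
-- in-bounds orthogonal neighbours of height h
def pvRound (map : List (List Int)) (fr : PySem.Set (Int × Int)) (h : Int) :
    PySem.Set (Int × Int) :=
  fr.foldl (fun nf c =>
      [(c.1, c.2 - 1), (c.1, c.2 + 1), (c.1 - 1, c.2), (c.1 + 1, c.2)].foldl (fun nf q =>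
        if 0 ≤ q.2 ∧ q.2 < (map.length : Int) ∧
           0 ≤ q.1 ∧ q.1 < ((PySem.List.pyGetD map q.2 []).length : Int) ∧
           pvCell map q.1 q.2 = h
        then PySem.Set.add nf q else nf) nf)
    PySem.Set.empty

def part1_alt (map : List (List Int)) : Int :=
  (PySem.List.enumerate map 0).foldl (fun total yrow =>
    (PySem.List.enumerate yrow.2 0).foldl (fun total xv =>
      if xv.2 = 9 then
        let frontier := PySem.Set.add PySem.Set.empty (xv.1, yrow.1)
        let frontier := (PySem.List.pyRange 8 (-1) (-1)).foldl (pvRound map) frontier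
        total + (frontier.length : Int)
      else total) total) 0

-- ===== PRECONDITION & SPEC =====
-- Pre_ excludes ragged grids that contain a 9: on those A walks every row with row 0's
-- width (len(map[0])), so it raises IndexError or silently skips cells of longer rows,
-- an accident of A's implementation; B uses each row's own length.
def Pre_part1 (map : List (List Int)) : Prop :=
  (∀ row ∈ map, row.length = (map.headD []).length) ∨ (∀ row ∈ map, ∀ v ∈ row, v ≠ 9)
instance (map : List (List Int)) : Decidable (Pre_part1 map) := by unfold Pre_part1; infer_instance
def pvWitness_part1 : List (List Int) := [[9, 8, 7], [0, 1, 6], [1, 2, 5]]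

def Spec_part1 (map : List (List Int)) (out : Int) : Prop := out = part1_alt map
instance (map : List (List Int)) (out : Int) : Decidable (Spec_part1 map out) := by unfold Spec_part1; infer_instance

-- ===== CLAIM (what is proved, stated in full; the proofs are below) =====
def Claim_equal_part1 : Prop := ∀ (map : List (List Int)), Dom_part1 map → Pre_part1 map → Spec_part1 map (part1 map)

-- ===== LEMMAS AND PROOFS =====

-- proof-side abbreviations (used only below)
def pvW (map : List (List Int)) : Nat := (map.headD []).length

def pvRect (map : List (List Int)) : Prop := ∀ row ∈ map, row.length = pvW map

def pvInB (map : List (List Int)) (p : Int × Int) : Prop :=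
  0 ≤ p.2 ∧ p.2 < (map.length : Int) ∧ 0 ≤ p.1 ∧ p.1 < (pvW map : Int)

-- downhill chains: pvReachK map k c q ⟺ q is reached from c in exactly k
-- steps, each step going to an orthogonal neighbour one height lower, never
-- stepping out of a height-0 cell (A stops there)
def pvReachK (map : List (List Int)) : Nat → (Int × Int) → (Int × Int) → Prop
  | 0, c, q => q = c
  | k+1, c, q => ∃ p, pvReachK map k c p ∧ pvCell map p.1 p.2 ≠ 0 ∧ q ∈ getNextStep map p.1 p.2

-- number of height-0 cells recorded in a visited dict
def pvCnt0 (map : List (List Int)) (vis : PySem.Dict (Int × Int) Bool) : Int :=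
  ((vis.keys.filter (fun q => pvCell map q.1 q.2 == 0)).length : Int)

-- B's per-summit score
def pvScore (map : List (List Int)) (c : Int × Int) : Int :=
  (((PySem.List.pyRange 8 (-1) (-1)).foldl (pvRound map)
      (PySem.Set.add PySem.Set.empty c)).length : Int)

lemma pvRowlen (map : List (List Int)) (hr : pvRect map) (y : Int)
    (h0 : 0 ≤ y) (h1 : y < (map.length : Int)) :
    (PySem.List.pyGetD map y []).length = pvW map :=
  hr _ (PySem.List.pyGetD_mem map [] (by simp [PySem.Raise.InRange]; omega))

lemma pvCell_mem (map : List (List Int)) (x y : Int)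
    (hy0 : 0 ≤ y) (hy1 : y < (map.length : Int))
    (hx0 : 0 ≤ x) (hx1 : x < ((PySem.List.pyGetD map y []).length : Int)) :
    pvCell map x y ∈ PySem.List.pyGetD map y [] ∧ PySem.List.pyGetD map y [] ∈ map := by
  refine ⟨PySem.List.pyGetD_mem _ _ (by simp [PySem.Raise.InRange]; omega),
    PySem.List.pyGetD_mem map [] (by simp [PySem.Raise.InRange]; omega)⟩

lemma getNextStep_eq (map : List (List Int)) (x y : Int) :
    getNextStep map x y =
      (if y > 0 ∧ pvCell map x (y-1) = pvCell map x y - 1 then [(x, y-1)] else []) ++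
      (if y < (map.length : Int) - 1 ∧ pvCell map x (y+1) = pvCell map x y - 1 then [(x, y+1)] else []) ++
      (if x > 0 ∧ pvCell map (x-1) y = pvCell map x y - 1 then [(x-1, y)] else []) ++
      (if x < ((PySem.List.pyGetD map 0 []).length : Int) - 1 ∧ pvCell map (x+1) y = pvCell map x y - 1
        then [(x+1, y)] else []) := by
  simp only [getNextStep]
  split_ifs <;> simp

lemma mem_ite_singleton (c : Prop) [Decidable c] (a q : Int × Int) :
    q ∈ (if c then [a] else ([] : List (Int × Int))) ↔ c ∧ q = a := by
  split_ifs with h <;> simp [h]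

lemma mem_getNextStep (map : List (List Int)) (hr : pvRect map) (p : Int × Int)
    (hp : pvInB map p) (q : Int × Int) :
    q ∈ getNextStep map p.1 p.2 ↔
      (q ∈ [(p.1, p.2 - 1), (p.1, p.2 + 1), (p.1 - 1, p.2), (p.1 + 1, p.2)] ∧
        pvInB map q ∧ pvCell map q.1 q.2 = pvCell map p.1 p.2 - 1) := by
  obtain ⟨hy0, hy1, hx0, hx1⟩ := hp
  have hlen : 0 < map.length := by omega
  have hsz : ((PySem.List.pyGetD map 0 []).length : Int) = (pvW map : Int) := by
    exact_mod_cast congrArg Nat.cast (pvRowlen map hr 0 le_rfl (by exact_mod_cast hlen))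
  rw [getNextStep_eq]
  simp only [List.mem_append, mem_ite_singleton]
  constructor
  · rintro (((⟨hg, hq⟩ | ⟨hg, hq⟩) | ⟨hg, hq⟩) | ⟨hg, hq⟩) <;> subst hq <;>
      exact ⟨by simp, ⟨by simp; omega, by simp; omega, by simp; omega, by simp; omega⟩,
        by simpa using hg.2⟩
  · rintro ⟨hq, hb, hval⟩
    simp only [List.mem_cons, List.not_mem_nil, or_false] at hq
    obtain ⟨hb1, hb2, hb3, hb4⟩ := hb
    rcases hq with hq | hq | hq | hq <;> subst hq <;>
      simp only at hb1 hb2 hb3 hb4 <;> simp only at hval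
    · exact Or.inl (Or.inl (Or.inl ⟨⟨by omega, hval⟩, rfl⟩))
    · exact Or.inl (Or.inl (Or.inr ⟨⟨by omega, hval⟩, rfl⟩))
    · exact Or.inl (Or.inr ⟨⟨by omega, hval⟩, rfl⟩)
    · exact Or.inr ⟨⟨by omega, hval⟩, rfl⟩

lemma pvReachK_cell (map : List (List Int)) (hr : pvRect map) (c : Int × Int)
    (hc : pvInB map c) (k : Nat) (q : Int × Int) (h : pvReachK map k c q) :
    pvInB map q ∧ pvCell map q.1 q.2 = pvCell map c.1 c.2 - k := by
  induction k generalizing q with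
  | zero =>
    cases h
    exact ⟨hc, by simp⟩
  | succ k ih =>
    obtain ⟨p, hp, hne, hq⟩ := h
    obtain ⟨hpb, hpc⟩ := ih p hp
    obtain ⟨-, hqb, hqc⟩ := (mem_getNextStep map hr p hpb q).mp hq
    exact ⟨hqb, by push_cast; omega⟩

-- sum of the second components after an in-place overwrite at a key occurring once
lemma pvSum_snd_replace (l : List ((Int × Int) × Int)) (k : Int × Int) (v w : Int)
    (hnd : (l.map Prod.fst).Nodup) (hm : (k, w) ∈ l) :
    ((l.map (fun p => if p.1 == k then (k, v) else p)).map Prod.snd).sum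
      = (l.map Prod.snd).sum - w + v := by
  induction l with
  | nil => simp at hm
  | cons a t ih =>
    simp only [List.map_cons, List.nodup_cons, List.mem_map] at hnd
    rcases List.mem_cons.mp hm with h | h
    · subst h
      have ht : List.map (fun p => if p.1 == k then ((k, v) : (Int × Int) × Int) else p) t = t := by
        conv_rhs => rw [← List.map_id t]
        apply List.map_congr_left
        intro p hp
        have hne : p.1 ≠ k := fun he => hnd.1 ⟨p, hp, by simp [he]⟩
        simp [hne]
      simp only [List.map_cons, ht]
      simp
      ring
    · have hak : (a.1 == k) = false := by
        refine beq_eq_false_iff_ne.mpr (fun he => hnd.1 ⟨(k, w), h, ?_⟩)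
        simp [he]
      simp only [List.map_cons, List.sum_cons, hak, Bool.false_eq_true, if_false]
      rw [ih hnd.2 h]
      ring

lemma pvSum_values_insert (d : PySem.Dict (Int × Int) Int) (k : Int × Int) (v : Int)
    (hnd : d.keys.Nodup) :
    (d.insert k v).values.sum = d.values.sum - d.getD k 0 + v := by
  have hkeys : d.keys = d.items.map Prod.fst := rfl
  have hvals : ∀ e : PySem.Dict (Int × Int) Int, e.values = e.items.map Prod.snd := fun _ => rfl
  by_cases hct : d.contains k
  · obtain ⟨w, hw⟩ : ∃ w, d.get? k = some w := by
      rw [PySem.Dict.contains_eq_isSome_get?] at hct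
      exact Option.isSome_iff_exists.mp hct
    have hm := PySem.Dict.mem_items_of_get?_eq_some d hw
    have hgd : d.getD k 0 = w := by rw [PySem.Dict.getD_eq_get?_getD, hw]; rfl
    rw [hvals, hvals, PySem.Dict.items_insert_of_contains d v hct, hgd]
    exact pvSum_snd_replace d.items k v w (by rw [← hkeys]; exact hnd) hm
  · rw [hvals, hvals, PySem.Dict.items_insert_of_not_contains d v (by simpa using hct),
      PySem.Dict.getD_of_not_contains d 0 (by simpa using hct)]
    simp

lemma pvCnt0_insert (map : List (List Int)) (vis : PySem.Dict (Int × Int) Bool)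
    (p : Int × Int) (hnc : vis.contains p = false) :
    pvCnt0 map (vis.insert p true)
      = pvCnt0 map vis + (if pvCell map p.1 p.2 = 0 then 1 else 0) := by
  unfold pvCnt0
  rw [PySem.Dict.keys_insert_of_not_contains vis true hnc, List.filter_append]
  by_cases h : pvCell map p.1 p.2 = 0 <;> simp [h]

-- the two result-dict statements A performs on a newly visited height-0 cell add 1 to the value sum
lemma pvRes_step (res : PySem.Dict (Int × Int) Int) (pos : Int × Int) (hnd : res.keys.Nodup) :
    (((if res.contains pos then res else res.insert pos 0).insert pos
        ((if res.contains pos then res else res.insert pos 0).getD pos 0 + 1)).values.sum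
      = res.values.sum + 1) ∧
    ((if res.contains pos then res else res.insert pos 0).insert pos
        ((if res.contains pos then res else res.insert pos 0).getD pos 0 + 1)).keys.Nodup := by
  by_cases hct : res.contains pos
  · simp only [hct, if_true]
    exact ⟨by rw [pvSum_values_insert res pos _ hnd]; ring,
      PySem.Dict.nodup_keys_insert _ _ _ hnd⟩
  · simp only [hct, if_false, Bool.false_eq_true]
    have hnd1 : (res.insert pos 0).keys.Nodup := PySem.Dict.nodup_keys_insert _ _ _ hnd
    constructor
    · rw [pvSum_values_insert _ pos _ hnd1, PySem.Dict.getD_insert_self,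
        pvSum_values_insert res pos 0 hnd,
        PySem.Dict.getD_of_not_contains res 0 (by simpa using hct)]
      ring
    · exact PySem.Dict.nodup_keys_insert _ _ _ hnd1

-- unfolding equations for ftLoop
lemma ftLoop_nil (map : List (List Int)) (fuel : Nat) (res : PySem.Dict (Int × Int) Int)
    (vis : PySem.Dict (Int × Int) Bool) : ftLoop map fuel [] res vis = (res, vis) := by
  simp [ftLoop]

lemma ftLoop_cons_vis (map : List (List Int)) (fuel : Nat) (pos : Int × Int)
    (rest : List (Int × Int)) (res : PySem.Dict (Int × Int) Int)
    (vis : PySem.Dict (Int × Int) Bool) (hv : vis.contains pos = true) :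
    ftLoop map fuel (pos :: rest) res vis = ftLoop map fuel rest res vis := by
  rw [ftLoop]; simp [hv]

lemma ftLoop_cons_zero (map : List (List Int)) (fuel : Nat) (pos : Int × Int)
    (rest : List (Int × Int)) (res : PySem.Dict (Int × Int) Int)
    (vis : PySem.Dict (Int × Int) Bool) (hv : vis.contains pos = false)
    (h0 : pvCell map pos.1 pos.2 = 0) :
    ftLoop map fuel (pos :: rest) res vis =
      ftLoop map fuel rest
        ((if res.contains pos then res else res.insert pos 0).insert pos
          ((if res.contains pos then res else res.insert pos 0).getD pos 0 + 1))
        (vis.insert pos true) := by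
  rw [ftLoop]; simp [hv, h0]

lemma ftLoop_cons_rec (map : List (List Int)) (fuel : Nat) (pos : Int × Int)
    (rest : List (Int × Int)) (res : PySem.Dict (Int × Int) Int)
    (vis : PySem.Dict (Int × Int) Bool) (hv : vis.contains pos = false)
    (h0 : pvCell map pos.1 pos.2 ≠ 0) :
    ftLoop map (fuel + 1) (pos :: rest) res vis =
      ftLoop map (fuel + 1) rest
        (ftLoop map fuel ((getNextStep map pos.1 pos.2).reverse) res (vis.insert pos true)).1
        (ftLoop map fuel ((getNextStep map pos.1 pos.2).reverse) res (vis.insert pos true)).2 := by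
  rw [ftLoop]; simp [hv, h0]

-- the main invariant of A's DFS loop
lemma ftLoop_spec (map : List (List Int)) (hr : pvRect map) (c : Int × Int)
    (hc : pvInB map c) :
    ∀ (fuel : Nat) (positions : List (Int × Int)) (res : PySem.Dict (Int × Int) Int)
      (vis : PySem.Dict (Int × Int) Bool),
      (∀ p ∈ positions, (∃ k, 0 < k ∧ pvReachK map k c p) ∧
          0 ≤ pvCell map p.1 p.2 ∧ pvCell map p.1 p.2 < (fuel : Int)) →
      res.keys.Nodup → vis.keys.Nodup →
      (∀ q, vis.contains q = true → (ftLoop map fuel positions res vis).2.contains q = true) ∧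
      (∀ q, (ftLoop map fuel positions res vis).2.contains q = true →
          vis.contains q = true ∨ ∃ k, 0 < k ∧ pvReachK map k c q) ∧
      (∀ p ∈ positions, (ftLoop map fuel positions res vis).2.contains p = true) ∧
      (∀ q, (ftLoop map fuel positions res vis).2.contains q = true →
          vis.contains q = false → pvCell map q.1 q.2 ≠ 0 →
          ∀ r ∈ getNextStep map q.1 q.2, (ftLoop map fuel positions res vis).2.contains r = true) ∧
      (ftLoop map fuel positions res vis).1.keys.Nodup ∧
      (ftLoop map fuel positions res vis).2.keys.Nodup ∧
      (ftLoop map fuel positions res vis).1.values.sum + pvCnt0 map vis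
        = res.values.sum + pvCnt0 map (ftLoop map fuel positions res vis).2 := by
  intro fuel
  induction fuel with
  | zero =>
    intro positions res vis hpos hres hvis
    cases positions with
    | nil =>
      rw [ftLoop_nil]
      exact ⟨fun q h => h, fun q h => Or.inl h, by simp, fun q h hn => absurd h (by simp [hn]),
        hres, hvis, rfl⟩
    | cons pos rest =>
      exfalso
      obtain ⟨-, h1, h2⟩ := hpos pos (by simp)
      push_cast at h2
      omega
  | succ fuel ihf =>
    intro positions
    induction positions with
    | nil =>
      intro res vis hpos hres hvis
      rw [ftLoop_nil]
      exact ⟨fun q h => h, fun q h => Or.inl h, by simp, fun q h hn => absurd h (by simp [hn]),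
        hres, hvis, rfl⟩
    | cons pos rest ihr =>
      intro res vis hpos hres hvis
      obtain ⟨⟨k0, hk0, hreach0⟩, hc0, hc1⟩ := hpos pos (by simp)
      have hposIn : pvInB map pos := (pvReachK_cell map hr c hc _ pos hreach0).1
      have hrest : ∀ p ∈ rest, (∃ k, 0 < k ∧ pvReachK map k c p) ∧
          0 ≤ pvCell map p.1 p.2 ∧ pvCell map p.1 p.2 < ((fuel + 1 : Nat) : Int) :=
        fun p hp => hpos p (by simp [hp])
      by_cases hv : vis.contains pos = true
      · rw [ftLoop_cons_vis map _ pos rest res vis hv]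
        obtain ⟨i1, i2, i3, i4, i5, i6, i7⟩ := ihr res vis hrest hres hvis
        refine ⟨i1, i2, ?_, i4, i5, i6, i7⟩
        intro p hp
        rcases List.mem_cons.mp hp with h | h
        · exact h ▸ i1 pos hv
        · exact i3 p h
      · have hv' : vis.contains pos = false := by simpa using hv
        have hvis1 : (vis.insert pos true).keys.Nodup := PySem.Dict.nodup_keys_insert _ _ _ hvis
        have hcont1 : ∀ q, (vis.insert pos true).contains q = true ↔
            q = pos ∨ vis.contains q = true := by
          intro q
          rw [PySem.Dict.contains_insert]
          simp [beq_iff_eq]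
        by_cases h0 : pvCell map pos.1 pos.2 = 0
        · rw [ftLoop_cons_zero map _ pos rest res vis hv' h0]
          obtain ⟨hsum2, hnd2⟩ := pvRes_step res pos hres
          obtain ⟨i1, i2, i3, i4, i5, i6, i7⟩ := ihr _ (vis.insert pos true) hrest hnd2 hvis1
          have hmono : ∀ q, vis.contains q = true →
              (ftLoop map (fuel + 1) rest _ (vis.insert pos true)).2.contains q = true :=
            fun q h => i1 q ((hcont1 q).mpr (Or.inr h))
          refine ⟨hmono, ?_, ?_, ?_, i5, i6, ?_⟩
          · intro q hq
            rcases i2 q hq with h | h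
            · rcases (hcont1 q).mp h with h | h
              · exact Or.inr ⟨k0, hk0, h ▸ hreach0⟩
              · exact Or.inl h
            · exact Or.inr h
          · intro p hp
            rcases List.mem_cons.mp hp with h | h
            · exact h ▸ i1 pos ((hcont1 pos).mpr (Or.inl rfl))
            · exact i3 p h
          · intro q hq hqf hqc r hrN
            by_cases hq1 : (vis.insert pos true).contains q = true
            · rcases (hcont1 q).mp hq1 with h | h
              · exact absurd (h ▸ h0) hqc
              · rw [h] at hqf; cases hqf
            · exact i4 q hq (by simpa using hq1) hqc r hrN
          · have hcnt : pvCnt0 map (vis.insert pos true) = pvCnt0 map vis + 1 := by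
              rw [pvCnt0_insert map vis pos hv']
              simp [h0]
            rw [hcnt] at i7
            omega
        · have hcell1 : 1 ≤ pvCell map pos.1 pos.2 := by omega
          rw [ftLoop_cons_rec map fuel pos rest res vis hv' h0]
          have hnested : ∀ p ∈ (getNextStep map pos.1 pos.2).reverse,
              (∃ k, 0 < k ∧ pvReachK map k c p) ∧
              0 ≤ pvCell map p.1 p.2 ∧ pvCell map p.1 p.2 < ((fuel : Nat) : Int) := by
            intro p hp
            rw [List.mem_reverse] at hp
            obtain ⟨-, -, hpc⟩ := (mem_getNextStep map hr pos hposIn p).mp hp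
            refine ⟨⟨k0 + 1, by omega, ⟨pos, hreach0, h0, hp⟩⟩, by omega, ?_⟩
            push_cast at hc1 ⊢
            omega
          obtain ⟨n1, n2, n3, n4, n5, n6, n7⟩ :=
            ihf ((getNextStep map pos.1 pos.2).reverse) res (vis.insert pos true) hnested hres hvis1
          obtain ⟨t1, t2, t3, t4, t5, t6, t7⟩ := ihr _ _ hrest n5 n6
          have hmono1 : ∀ q, (vis.insert pos true).contains q = true →
              (ftLoop map (fuel + 1) rest _ _).2.contains q = true :=
            fun q h => t1 q (n1 q h)
          refine ⟨fun q h => hmono1 q ((hcont1 q).mpr (Or.inr h)), ?_, ?_, ?_, t5, t6, ?_⟩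
          · intro q hq
            rcases t2 q hq with h | h
            · rcases n2 q h with h | h
              · rcases (hcont1 q).mp h with h | h
                · exact Or.inr ⟨k0, hk0, h ▸ hreach0⟩
                · exact Or.inl h
              · exact Or.inr h
            · exact Or.inr h
          · intro p hp
            rcases List.mem_cons.mp hp with h | h
            · exact h ▸ hmono1 pos ((hcont1 pos).mpr (Or.inl rfl))
            · exact t3 p h
          · intro q hq hqf hqc r hrN
            by_cases hq1 : (vis.insert pos true).contains q = true
            · rcases (hcont1 q).mp hq1 with h | h
              · subst h
                exact t1 r (n3 r (by rw [List.mem_reverse]; exact hrN))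
              · rw [h] at hqf; cases hqf
            · by_cases hq2 : (ftLoop map fuel ((getNextStep map pos.1 pos.2).reverse) res
                  (vis.insert pos true)).2.contains q = true
              · exact t1 r (n4 q hq2 (by simpa using hq1) hqc r hrN)
              · exact t4 q hq (by simpa using hq2) hqc r hrN
          · have hcnt : pvCnt0 map (vis.insert pos true) = pvCnt0 map vis := by
              rw [pvCnt0_insert map vis pos hv']
              simp [h0]
            rw [hcnt] at n7
            omega

-- summary of one per-summit call of A (fresh visited dict)
lemma findTrails_spec (map : List (List Int)) (hr : pvRect map) (c : Int × Int)
    (hc : pvInB map c) (h9 : pvCell map c.1 c.2 = 9) (res : PySem.Dict (Int × Int) Int)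
    (hnd : res.keys.Nodup) :
    (findTrails 10 map c.1 c.2 res PySem.Dict.empty).1.keys.Nodup ∧
    (findTrails 10 map c.1 c.2 res PySem.Dict.empty).2.keys.Nodup ∧
    (findTrails 10 map c.1 c.2 res PySem.Dict.empty).1.values.sum
      = res.values.sum + pvCnt0 map (findTrails 10 map c.1 c.2 res PySem.Dict.empty).2 ∧
    (∀ q, (findTrails 10 map c.1 c.2 res PySem.Dict.empty).2.contains q = true ↔
        ∃ k, 0 < k ∧ pvReachK map k c q) := by
  have hposs : ∀ p ∈ (getNextStep map c.1 c.2).reverse,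
      (∃ k, 0 < k ∧ pvReachK map k c p) ∧
      0 ≤ pvCell map p.1 p.2 ∧ pvCell map p.1 p.2 < ((10 : Nat) : Int) := by
    intro p hp
    rw [List.mem_reverse] at hp
    obtain ⟨-, -, hpc⟩ := (mem_getNextStep map hr c hc p).mp hp
    rw [hpc, h9]
    exact ⟨⟨1, one_pos, ⟨c, rfl, by rw [h9]; norm_num, hp⟩⟩, by norm_num, by norm_num⟩
  obtain ⟨i1, i2, i3, i4, i5, i6, i7⟩ :=
    ftLoop_spec map hr c hc 10 ((getNextStep map c.1 c.2).reverse) res PySem.Dict.empty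
      hposs hnd PySem.Dict.nodup_keys_empty
  have hcnt0 : pvCnt0 map (PySem.Dict.empty : PySem.Dict (Int × Int) Bool) = 0 := by
    unfold pvCnt0
    rw [PySem.Dict.keys_empty]
    simp
  unfold findTrails
  rw [hcnt0] at i7
  refine ⟨i5, i6, by omega, ?_⟩
  intro q
  constructor
  · intro hq
    rcases i2 q hq with h | h
    · rw [PySem.Dict.contains_empty] at h; cases h
    · exact h
  · rintro ⟨k, hk, hre⟩
    have H : ∀ (k : Nat) (q : Int × Int), pvReachK map (k + 1) c q →
        (ftLoop map 10 ((getNextStep map c.1 c.2).reverse) res PySem.Dict.empty).2.contains q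
          = true := by
      intro k
      induction k with
      | zero =>
        intro q hre
        obtain ⟨p, hp, -, hqN⟩ := hre
        cases hp
        exact i3 q (by rw [List.mem_reverse]; exact hqN)
      | succ k ihk =>
        intro q hre
        obtain ⟨p, hp, hne, hqN⟩ := hre
        exact i4 p (ihk p hp) (PySem.Dict.contains_empty p) hne q hqN
    cases k with
    | zero => omega
    | succ k => exact H k q hre

-- membership through a conditional-add fold (B's inner loops)
lemma pvMem_foldl_addIf (L : List (Int × Int)) (P : Int × Int → Prop) [DecidablePred P] :
    ∀ (s : PySem.Set (Int × Int)) (y : Int × Int),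
      (y ∈ L.foldl (fun s q => if P q then PySem.Set.add s q else s) s ↔
        y ∈ s ∨ (y ∈ L ∧ P y)) := by
  induction L with
  | nil => simp
  | cons a t ih =>
    intro s y
    rw [List.foldl_cons, ih]
    by_cases hP : P a
    · simp only [hP, if_true, PySem.Set.mem_add, List.mem_cons]
      constructor
      · rintro ((h | h) | ⟨h1, h2⟩)
        exacts [Or.inl h, Or.inr ⟨Or.inl h, by rwa [h]⟩, Or.inr ⟨Or.inr h1, h2⟩]
      · rintro (h | ⟨h1 | h1, h2⟩)
        exacts [Or.inl (Or.inl h), Or.inl (Or.inr h1), Or.inr ⟨h1, h2⟩]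
    · simp only [hP, if_false, List.mem_cons]
      constructor
      · rintro (h | ⟨h1, h2⟩)
        exacts [Or.inl h, Or.inr ⟨Or.inr h1, h2⟩]
      · rintro (h | ⟨h1 | h1, h2⟩)
        exacts [Or.inl h, absurd (by rwa [h1] at h2) hP, Or.inr ⟨h1, h2⟩]

lemma pvNodup_foldl_addIf (L : List (Int × Int)) (P : Int × Int → Prop) [DecidablePred P] :
    ∀ (s : PySem.Set (Int × Int)), s.Nodup →
      (L.foldl (fun s q => if P q then PySem.Set.add s q else s) s).Nodup := by
  induction L with
  | nil => exact fun s hs => hs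
  | cons a t ih =>
    intro s hs
    rw [List.foldl_cons]
    by_cases hP : P a
    · simp only [hP, if_true]; exact ih _ (PySem.Set.nodup_add s a hs)
    · simp only [hP, if_false]; exact ih _ hs

lemma mem_pvRound (map : List (List Int)) (hr : pvRect map) (h : Int) (_h0 : 0 ≤ h)
    (fr : PySem.Set (Int × Int))
    (hfr : ∀ p ∈ fr, pvInB map p ∧ pvCell map p.1 p.2 = h + 1) (q : Int × Int) :
    q ∈ pvRound map fr h ↔ ∃ p ∈ fr, q ∈ getNextStep map p.1 p.2 := by
  have Hmem : ∀ (L : List (Int × Int)) (s : PySem.Set (Int × Int)),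
      (q ∈ L.foldl (fun nf c =>
        [(c.1, c.2 - 1), (c.1, c.2 + 1), (c.1 - 1, c.2), (c.1 + 1, c.2)].foldl (fun nf q =>
          if 0 ≤ q.2 ∧ q.2 < (map.length : Int) ∧
             0 ≤ q.1 ∧ q.1 < ((PySem.List.pyGetD map q.2 []).length : Int) ∧
             pvCell map q.1 q.2 = h
          then PySem.Set.add nf q else nf) nf) s ↔
        q ∈ s ∨ ∃ p ∈ L, (q ∈ [(p.1, p.2 - 1), (p.1, p.2 + 1), (p.1 - 1, p.2), (p.1 + 1, p.2)] ∧
          (0 ≤ q.2 ∧ q.2 < (map.length : Int) ∧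
           0 ≤ q.1 ∧ q.1 < ((PySem.List.pyGetD map q.2 []).length : Int) ∧
           pvCell map q.1 q.2 = h))) := by
    intro L
    induction L with
    | nil => simp
    | cons a t ih =>
      intro s
      rw [List.foldl_cons, ih, pvMem_foldl_addIf]
      constructor
      · rintro ((hq | ⟨h1, h2⟩) | ⟨p, hp, hmem⟩)
        exacts [Or.inl hq, Or.inr ⟨a, by simp, h1, h2⟩, Or.inr ⟨p, by simp [hp], hmem⟩]
      · rintro (hq | ⟨p, hp, hmem⟩)
        · exact Or.inl (Or.inl hq)
        · rcases List.mem_cons.mp hp with h | h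
          · exact Or.inl (Or.inr (h ▸ hmem))
          · exact Or.inr ⟨p, h, hmem⟩
  unfold pvRound
  rw [Hmem fr PySem.Set.empty]
  simp only [show (PySem.Set.empty : PySem.Set (Int × Int)) = [] from rfl, List.not_mem_nil,
    false_or]
  constructor
  · rintro ⟨p, hp, hcand, hb1, hb2, hb3, hb4, hb5⟩
    obtain ⟨hpB, hpC⟩ := hfr p hp
    refine ⟨p, hp, (mem_getNextStep map hr p hpB q).mpr ⟨hcand, ⟨hb1, hb2, hb3, ?_⟩, by omega⟩⟩
    rw [← pvRowlen map hr q.2 hb1 hb2]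
    exact hb4
  · rintro ⟨p, hp, hqN⟩
    obtain ⟨hpB, hpC⟩ := hfr p hp
    obtain ⟨hcand, ⟨hb1, hb2, hb3, hb4⟩, hval⟩ := (mem_getNextStep map hr p hpB q).mp hqN
    refine ⟨p, hp, hcand, hb1, hb2, hb3, ?_, by omega⟩
    rw [pvRowlen map hr q.2 hb1 hb2]
    exact hb4

lemma pvNodup_pvRound (map : List (List Int)) (fr : PySem.Set (Int × Int)) (h : Int) :
    (pvRound map fr h).Nodup := by
  unfold pvRound
  suffices H : ∀ (L : List (Int × Int)) (s : PySem.Set (Int × Int)), s.Nodup →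
      (L.foldl (fun nf c =>
        [(c.1, c.2 - 1), (c.1, c.2 + 1), (c.1 - 1, c.2), (c.1 + 1, c.2)].foldl (fun nf q =>
          if 0 ≤ q.2 ∧ q.2 < (map.length : Int) ∧
             0 ≤ q.1 ∧ q.1 < ((PySem.List.pyGetD map q.2 []).length : Int) ∧
             pvCell map q.1 q.2 = h
          then PySem.Set.add nf q else nf) nf) s).Nodup by
    exact H fr PySem.Set.empty (by simp [PySem.Set.empty])
  intro L
  induction L with
  | nil => exact fun s hs => hs
  | cons a t ih =>
    intro s hs
    rw [List.foldl_cons]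
    exact ih _ (pvNodup_foldl_addIf _ _ s hs)

-- B's frontier rounds compute exactly the k-step reachable sets
-- B's frontier rounds compute exactly the 9-step reachable set
lemma pvFold_rounds (map : List (List Int)) (hr : pvRect map) (c : Int × Int)
    (hc : pvInB map c) (h9 : pvCell map c.1 c.2 = 9) :
    ∀ (j : Nat), j ≤ 9 → ∀ (fr : PySem.Set (Int × Int)), fr.Nodup →
      (∀ p, p ∈ fr ↔ pvReachK map (9 - j) c p) →
      ((PySem.List.pyRange ((j : Int) - 1) (-1) (-1)).foldl (pvRound map) fr).Nodup ∧
      (∀ p, p ∈ (PySem.List.pyRange ((j : Int) - 1) (-1) (-1)).foldl (pvRound map) fr ↔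
          pvReachK map 9 c p) := by
  intro j
  induction j with
  | zero =>
    intro _ fr hfrnd hmem
    rw [show ((0 : Nat) : Int) - 1 = -1 by norm_num, PySem.List.pyRange_neg_one_eq_nil le_rfl]
    exact ⟨hfrnd, by simpa using hmem⟩
  | succ j ihj =>
    intro hj9 fr hfrnd hmem
    have hj8 : j ≤ 8 := by omega
    have hfr : ∀ p ∈ fr, pvInB map p ∧ pvCell map p.1 p.2 = (j : Int) + 1 := by
      intro p hp
      obtain ⟨hb, hcell⟩ := pvReachK_cell map hr c hc _ p ((hmem p).mp hp)
      refine ⟨hb, ?_⟩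
      rw [hcell, h9]
      have : ((9 - (j + 1) : Nat) : Int) = 8 - (j : Int) := by
        rw [Nat.cast_sub (by omega)]
        push_cast
        ring
      rw [this]
      ring
    have hcons : PySem.List.pyRange (((j + 1 : Nat) : Int) - 1) (-1) (-1)
        = (j : Int) :: PySem.List.pyRange ((j : Int) - 1) (-1) (-1) := by
      have h1 : ((j + 1 : Nat) : Int) - 1 = (j : Int) := by push_cast; ring
      rw [h1, PySem.List.pyRange_neg_one_cons (by omega)]
    rw [hcons, List.foldl_cons]
    have hmem1 : ∀ p, p ∈ pvRound map fr (j : Int) ↔ pvReachK map (9 - j) c p := by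
      intro p
      rw [mem_pvRound map hr (j : Int) (by omega) fr hfr p]
      have hstep : (9 - j : Nat) = (9 - (j + 1)) + 1 := by omega
      rw [hstep]
      constructor
      · rintro ⟨u, hu, hpN⟩
        exact ⟨u, (hmem u).mp hu, by rw [(hfr u hu).2]; omega, hpN⟩
      · rintro ⟨u, hu, -, hpN⟩
        exact ⟨u, (hmem u).mpr hu, hpN⟩
    exact ihj (by omega) (pvRound map fr (j : Int)) (pvNodup_pvRound map fr (j : Int)) hmem1

-- per-summit agreement: the amount A's call adds to the result sum is B's score
lemma pvPer9 (map : List (List Int)) (hr : pvRect map) (c : Int × Int)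
    (hc : pvInB map c) (h9 : pvCell map c.1 c.2 = 9) (res : PySem.Dict (Int × Int) Int)
    (hnd : res.keys.Nodup) :
    (findTrails 10 map c.1 c.2 res PySem.Dict.empty).1.keys.Nodup ∧
    (findTrails 10 map c.1 c.2 res PySem.Dict.empty).1.values.sum
      = res.values.sum + pvScore map c := by
  obtain ⟨hnd', hvisnd, hsum, hvis⟩ := findTrails_spec map hr c hc h9 res hnd
  obtain ⟨hFnd, hFmem⟩ := pvFold_rounds map hr c hc h9 9 le_rfl
    (PySem.Set.add PySem.Set.empty c) (by simp [PySem.Set.add, PySem.Set.empty])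
    (by
      intro p
      simp [PySem.Set.add, PySem.Set.empty, pvReachK, eq_comm])
  have hrange : ((9 : Nat) : Int) - 1 = (8 : Int) := by norm_num
  rw [hrange] at hFnd hFmem
  refine ⟨hnd', ?_⟩
  rw [hsum]
  congr 1
  unfold pvCnt0 pvScore
  congr 1
  have hmemEq : ∀ q, q ∈ (findTrails 10 map c.1 c.2 res PySem.Dict.empty).2.keys.filter
      (fun q => pvCell map q.1 q.2 == 0) ↔
      q ∈ (PySem.List.pyRange 8 (-1) (-1)).foldl (pvRound map)
        (PySem.Set.add PySem.Set.empty c) := by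
    intro q
    rw [List.mem_filter, hFmem q, beq_iff_eq, ← PySem.Dict.contains_iff_mem_keys, hvis q]
    constructor
    · rintro ⟨⟨k, hk, hre⟩, hcell⟩
      obtain ⟨-, hcq⟩ := pvReachK_cell map hr c hc k q hre
      rw [hcell, h9] at hcq
      have hk9 : k = 9 := by omega
      exact hk9 ▸ hre
    · intro hre
      obtain ⟨-, hcq⟩ := pvReachK_cell map hr c hc 9 q hre
      rw [h9] at hcq
      exact ⟨⟨9, by omega, hre⟩, by omega⟩
  exact ((List.perm_ext_iff_of_nodup (hvisnd.filter _) hFnd).mpr hmemEq).length_eq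

-- the inner x-loop, threading A's result dict against B's running total
lemma pvInner_eq (map : List (List Int)) (hr : pvRect map) (y : Int)
    (hy0 : 0 ≤ y) (hy1 : y < (map.length : Int)) :
    ∀ (xs : List Int), (∀ x ∈ xs, 0 ≤ x ∧ x < ((PySem.List.pyGetD map y []).length : Int)) →
    ∀ (res : PySem.Dict (Int × Int) Int) (total : Int), res.keys.Nodup →
      res.values.sum = total →
      (xs.foldl (fun res x => if pvCell map x y = 9
          then (findTrails 10 map x y res PySem.Dict.empty).1 else res) res).keys.Nodup ∧
      (xs.foldl (fun res x => if pvCell map x y = 9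
          then (findTrails 10 map x y res PySem.Dict.empty).1 else res) res).values.sum
        = xs.foldl (fun total x => if pvCell map x y = 9
            then total + pvScore map (x, y) else total) total := by
  intro xs
  induction xs with
  | nil => exact fun _ res total hnd hsum => ⟨hnd, hsum⟩
  | cons x t ih =>
    intro hxs res total hnd hsum
    obtain ⟨hx0, hx1⟩ := hxs x (by simp)
    have hxW : x < ((pvW map : Nat) : Int) := by
      rw [← pvRowlen map hr y hy0 hy1]
      exact hx1
    simp only [List.foldl_cons]
    by_cases hcell : pvCell map x y = 9
    · simp only [hcell, if_true]
      obtain ⟨hnd', hsum'⟩ := pvPer9 map hr (x, y) ⟨hy0, hy1, hx0, hxW⟩ hcell res hnd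
      exact ih (fun p hp => hxs p (by simp [hp])) _ _ hnd' (by rw [hsum', hsum])
    · simp only [hcell, if_false]
      exact ih (fun p hp => hxs p (by simp [hp])) res total hnd hsum

-- the outer y-loop
lemma pvOuter_eq (map : List (List Int)) (hr : pvRect map) :
    ∀ (ys : List Int), (∀ y ∈ ys, 0 ≤ y ∧ y < (map.length : Int)) →
    ∀ (res : PySem.Dict (Int × Int) Int) (total : Int), res.keys.Nodup →
      res.values.sum = total →
      (ys.foldl (fun res y =>
          (PySem.List.pyRange 0 (PySem.List.pyGetD map y []).length 1).foldl
            (fun res x => if pvCell map x y = 9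
              then (findTrails 10 map x y res PySem.Dict.empty).1 else res) res) res).values.sum
        = ys.foldl (fun total y =>
            (PySem.List.pyRange 0 (PySem.List.pyGetD map y []).length 1).foldl
              (fun total x => if pvCell map x y = 9
                then total + pvScore map (x, y) else total) total) total := by
  intro ys
  induction ys with
  | nil => exact fun _ res total _ hsum => hsum
  | cons y t ih =>
    intro hys res total hnd hsum
    obtain ⟨hy0, hy1⟩ := hys y (by simp)
    simp only [List.foldl_cons]
    obtain ⟨hnd', hsum'⟩ := pvInner_eq map hr y hy0 hy1
      (PySem.List.pyRange 0 (PySem.List.pyGetD map y []).length 1)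
      (fun x hx => by rw [PySem.List.mem_pyRange_one] at hx; exact hx) res total hnd hsum
    exact ih (fun p hp => hys p (by simp [hp])) _ _ hnd' hsum'

-- B in index-loop form
lemma part1_alt_eq (map : List (List Int)) :
    part1_alt map =
      (PySem.List.pyRange 0 map.length 1).foldl (fun total y =>
        (PySem.List.pyRange 0 (PySem.List.pyGetD map y []).length 1).foldl
          (fun total x => if pvCell map x y = 9
            then total + pvScore map (x, y) else total) total) 0 := by
  unfold part1_alt
  rw [PySem.List.enumerate_eq_map_pyRange map ([] : List Int), List.foldl_map]
  simp only [PySem.List.len_eq]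
  apply PySem.List.foldl_congr_mem
  intro acc y _
  rw [PySem.List.enumerate_eq_map_pyRange (PySem.List.pyGetD map y []) (0 : Int),
    List.foldl_map]
  simp only [PySem.List.len_eq]
  rfl

lemma pvFoldl_const {α β : Type} (l : List α) (b : β) :
    l.foldl (fun acc _ => acc) b = b := by
  induction l generalizing b with
  | nil => rfl
  | cons a t ih => exact ih b

-- a grid without a 9 : both programs return 0
lemma pvNo9_A (map : List (List Int)) (h : ∀ row ∈ map, ∀ v ∈ row, v ≠ 9) :
    part1 map = 0 := by
  unfold part1
  have houter : (PySem.List.pyRange 0 map.length 1).foldl (fun res y =>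
      (PySem.List.pyRange 0 (PySem.List.pyGetD map y []).length 1).foldl
        (fun res x => if pvCell map x y = 9
          then (findTrails 10 map x y res PySem.Dict.empty).1 else res) res)
      (PySem.Dict.empty : PySem.Dict (Int × Int) Int) = PySem.Dict.empty := by
    rw [PySem.List.foldl_congr_mem _ _ (fun acc _ => acc) _ ?_, pvFoldl_const]
    intro acc y hy
    rw [PySem.List.mem_pyRange_one] at hy
    rw [PySem.List.foldl_congr_mem _ _ (fun acc2 _ => acc2) _ ?_, pvFoldl_const]
    intro acc2 x hx
    rw [PySem.List.mem_pyRange_one] at hx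
    obtain ⟨hvm, hrm⟩ := pvCell_mem map x y hy.1 hy.2 hx.1 hx.2
    simp [h _ hrm _ hvm]
  rw [houter]
  rfl

lemma pvNo9_B (map : List (List Int)) (h : ∀ row ∈ map, ∀ v ∈ row, v ≠ 9) :
    part1_alt map = 0 := by
  rw [part1_alt_eq]
  rw [PySem.List.foldl_congr_mem _ _ (fun acc _ => acc) _ ?_, pvFoldl_const]
  intro acc y hy
  rw [PySem.List.mem_pyRange_one] at hy
  rw [PySem.List.foldl_congr_mem _ _ (fun acc2 _ => acc2) _ ?_, pvFoldl_const]
  intro acc2 x hx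
  rw [PySem.List.mem_pyRange_one] at hx
  obtain ⟨hvm, hrm⟩ := pvCell_mem map x y hy.1 hy.2 hx.1 hx.2
  simp [h _ hrm _ hvm]

-- ===== VERDICT (by name: the statement is the Claim_ definition above) =====
theorem part1_spec : Claim_equal_part1 := by
  intro map _ hpre
  unfold Spec_part1
  rcases hpre with hrect | h9
  · have hr : pvRect map := hrect
    rw [part1_alt_eq]
    unfold part1
    exact pvOuter_eq map hr (PySem.List.pyRange 0 map.length 1)
      (fun y hy => by rw [PySem.List.mem_pyRange_one] at hy; exact hy)
      PySem.Dict.empty 0 PySem.Dict.nodup_keys_empty rfl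
  · rw [pvNo9_A map h9, pvNo9_B map h9]
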